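-- pv_equiv track=rewrite | github.com/chickengak/TIL | 프로그래머스/1/42840. 모의고사/모의고사.py | solution
-- ===== SOURCE A (Python) =====
-- def solution(answers):
--     answer = [0,0,0]
--     a = [1,2,3,4,5]
--     b = [2,1,2,3,2,4,2,5]
--     c = [3,3,1,1,2,2,4,4,5,5]
--
--     for i in range(len(answers)):
--         ans = answers[i]
--         if ans == a[i%5]:
--             answer[0] +=1
--         if ans == b[i%8]:
--             answer[1] +=1
--         if ans == c[i%10]:
--             answer[2] +=1
--
--     return [i+1 for i in range(len(answer)) if max(answer) == answer[i]]
-- ===== SOURCE B (Python) =====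
-- def solution(answers):
--     # histogram of (position mod 40, answer value); 40 = lcm of the pattern lengths 5, 8, 10,
--     # so each pattern's predicted value depends only on the position mod 40
--     hist = {}
--     for i, v in enumerate(answers):
--         k = (i % 40, v)
--         hist[k] = hist.get(k, 0) + 1
--     patterns = [[1, 2, 3, 4, 5],
--                 [2, 1, 2, 3, 2, 4, 2, 5],
--                 [3, 3, 1, 1, 2, 2, 4, 4, 5, 5]]
--     scores = [sum(cnt for (r, v), cnt in hist.items() if v == p[r % len(p)])
--               for p in patterns]
--     best = max(scores)
--     return [i + 1 for i in range(len(scores)) if scores[i] == best]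
-- ===== Notes on version B (the rewrite author's own statement) =====
-- stated objective: alternative
-- what changed: Instead of A's per-index loop updating three counters by direct comparison, B builds a histogram dict keyed by (position mod 40, value) in one pass (40 = lcm of the pattern lengths) and then scores each pattern from the histogram's items without rescanning the answers; the top-scorer selection stays the same.
import Mathlib
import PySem

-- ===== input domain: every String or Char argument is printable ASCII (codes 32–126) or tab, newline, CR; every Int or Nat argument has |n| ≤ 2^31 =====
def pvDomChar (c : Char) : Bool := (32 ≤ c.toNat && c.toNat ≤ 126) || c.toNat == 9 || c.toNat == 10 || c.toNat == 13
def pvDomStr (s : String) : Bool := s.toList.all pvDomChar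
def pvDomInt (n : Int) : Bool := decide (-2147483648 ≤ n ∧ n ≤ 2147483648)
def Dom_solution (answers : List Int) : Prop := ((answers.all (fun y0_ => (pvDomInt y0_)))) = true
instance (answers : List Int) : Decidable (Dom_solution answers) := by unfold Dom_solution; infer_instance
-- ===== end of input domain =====

-- B replaces A's per-index counting loop by a (position mod 40, value) histogram dict built once
-- (40 = lcm of the pattern lengths), then scores each pattern from the histogram; same result.

-- ===== PORT A =====
-- indexing uses pyGet?.getD 0: every index taken (i in range(len(answers)), i%5/8/10 into the fixed patterns) is in range, so none never occurs
def solution (answers : List Int) : List Int :=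
  let a : List Int := [1, 2, 3, 4, 5]
  let b : List Int := [2, 1, 2, 3, 2, 4, 2, 5]
  let c : List Int := [3, 3, 1, 1, 2, 2, 4, 4, 5, 5]
  let st :=
    (PySem.List.pyRange 0 (answers.length : Int) 1).foldl
      (fun st i =>
        let ans := (PySem.List.pyGet? answers i).getD 0
        ((if ans = (PySem.List.pyGet? a (PySem.Int.mod i 5)).getD 0 then st.1 + 1 else st.1),
         (if ans = (PySem.List.pyGet? b (PySem.Int.mod i 8)).getD 0 then st.2.1 + 1 else st.2.1),
         (if ans = (PySem.List.pyGet? c (PySem.Int.mod i 10)).getD 0 then st.2.2 + 1 else st.2.2)))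
      ((0 : Int), (0 : Int), (0 : Int))
  let answer : List Int := [st.1, st.2.1, st.2.2]
  let m := (PySem.List.max? answer (fun x => x)).getD 0
  (PySem.List.pyRange 0 (answer.length : Int) 1).foldl
    (fun acc i => if m = (PySem.List.pyGet? answer i).getD 0 then acc ++ [i + 1] else acc) []

-- ===== PORT B =====
-- hist[k] = hist.get(k, 0) + 1 over enumerate(answers), keyed by (i % 40, v)
def pvHist (answers : List Int) : PySem.Dict (Int × Int) Int :=
  (PySem.List.enumerate answers 0).foldl
    (fun h iv => h.insert (PySem.Int.mod iv.1 40, iv.2)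
                   (h.getD (PySem.Int.mod iv.1 40, iv.2) 0 + 1))
    PySem.Dict.empty

-- sum(cnt for (r, v), cnt in hist.items() if v == p[r % len(p)])
def pvHistScore (hist : PySem.Dict (Int × Int) Int) (p : List Int) : Int :=
  (hist.items.map (fun it =>
    if it.1.2 = (PySem.List.pyGet? p (PySem.Int.mod it.1.1 (p.length : Int))).getD 0
    then it.2 else (0 : Int))).sum

def solution_alt (answers : List Int) : List Int :=
  let hist := pvHist answers
  let patterns : List (List Int) :=
    [[1, 2, 3, 4, 5], [2, 1, 2, 3, 2, 4, 2, 5], [3, 3, 1, 1, 2, 2, 4, 4, 5, 5]]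
  let scores := patterns.map (fun p => pvHistScore hist p)
  let best := (PySem.List.max? scores (fun x => x)).getD 0
  (PySem.List.pyRange 0 (scores.length : Int) 1).foldl
    (fun acc i => if (PySem.List.pyGet? scores i).getD 0 = best then acc ++ [i + 1] else acc) []

-- ===== PRECONDITION & SPEC =====
def Spec_solution (answers : List Int) (out : List Int) : Prop := out = solution_alt answers
instance (answers : List Int) (out : List Int) : Decidable (Spec_solution answers out) := by unfold Spec_solution; infer_instance

-- ===== CLAIM (what is proved, stated in full; the proofs are below) =====
def Claim_equal_solution : Prop := ∀ (answers : List Int), Dom_solution answers → Spec_solution answers (solution answers)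

-- ===== LEMMAS AND PROOFS =====

-- number of indices i with answers[i] == p[i % len(p)] (proof-side characterisation of both programs)
def pvCnt (p : List Int) (answers : List Int) : Int :=
  ((PySem.List.enumerate answers 0).map
    (fun iv => if iv.2 = (PySem.List.pyGet? p (PySem.Int.mod iv.1 (p.length : Int))).getD 0
               then (1 : Int) else 0)).sum

theorem pvCnt_append (xs : List Int) (x : Int) (p : List Int) :
    pvCnt p (xs ++ [x]) =
      pvCnt p xs +
        (if x = (PySem.List.pyGet? p (PySem.Int.mod (xs.length : Int) (p.length : Int))).getD 0
         then (1 : Int) else 0) := by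
  simp [pvCnt, PySem.List.enumerate_append, PySem.List.enumerate_cons]

theorem pv_loop_eq (answers : List Int) :
    ((PySem.List.pyRange 0 (answers.length : Int) 1).foldl
      (fun st i =>
        let ans := (PySem.List.pyGet? answers i).getD 0
        ((if ans = (PySem.List.pyGet? ([1,2,3,4,5] : List Int) (PySem.Int.mod i 5)).getD 0 then st.1 + 1 else st.1),
         (if ans = (PySem.List.pyGet? ([2,1,2,3,2,4,2,5] : List Int) (PySem.Int.mod i 8)).getD 0 then st.2.1 + 1 else st.2.1),
         (if ans = (PySem.List.pyGet? ([3,3,1,1,2,2,4,4,5,5] : List Int) (PySem.Int.mod i 10)).getD 0 then st.2.2 + 1 else st.2.2)))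
      ((0 : Int), (0 : Int), (0 : Int)))
    = (pvCnt [1,2,3,4,5] answers, pvCnt [2,1,2,3,2,4,2,5] answers,
       pvCnt [3,3,1,1,2,2,4,4,5,5] answers) := by
  induction answers using List.reverseRecOn with
  | nil => simp [pvCnt, PySem.List.pyRange_one_eq_nil]
  | append_singleton xs x ih =>
    have hlen : ((xs ++ [x]).length : Int) = (xs.length : Int) + 1 := by
      simp
    rw [hlen, PySem.List.pyRange_one_succ_right (by positivity), List.foldl_append]
    have hcongr :
        (PySem.List.pyRange 0 (xs.length : Int) 1).foldl
          (fun st i =>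
            let ans := (PySem.List.pyGet? (xs ++ [x]) i).getD 0
            ((if ans = (PySem.List.pyGet? ([1,2,3,4,5] : List Int) (PySem.Int.mod i 5)).getD 0 then st.1 + 1 else st.1),
             (if ans = (PySem.List.pyGet? ([2,1,2,3,2,4,2,5] : List Int) (PySem.Int.mod i 8)).getD 0 then st.2.1 + 1 else st.2.1),
             (if ans = (PySem.List.pyGet? ([3,3,1,1,2,2,4,4,5,5] : List Int) (PySem.Int.mod i 10)).getD 0 then st.2.2 + 1 else st.2.2)))
          ((0 : Int), (0 : Int), (0 : Int))
        = (PySem.List.pyRange 0 (xs.length : Int) 1).foldl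
          (fun st i =>
            let ans := (PySem.List.pyGet? xs i).getD 0
            ((if ans = (PySem.List.pyGet? ([1,2,3,4,5] : List Int) (PySem.Int.mod i 5)).getD 0 then st.1 + 1 else st.1),
             (if ans = (PySem.List.pyGet? ([2,1,2,3,2,4,2,5] : List Int) (PySem.Int.mod i 8)).getD 0 then st.2.1 + 1 else st.2.1),
             (if ans = (PySem.List.pyGet? ([3,3,1,1,2,2,4,4,5,5] : List Int) (PySem.Int.mod i 10)).getD 0 then st.2.2 + 1 else st.2.2)))
          ((0 : Int), (0 : Int), (0 : Int)) := by
      apply PySem.List.foldl_congr_mem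
      intro acc i hi
      have hib := (PySem.List.mem_pyRange_one.mp hi)
      have hget : PySem.List.pyGet? (xs ++ [x]) i = PySem.List.pyGet? xs i := by
        rw [PySem.List.pyGet?_of_nonneg _ hib.1, PySem.List.pyGet?_of_nonneg _ hib.1]
        rw [List.getElem?_append_left (by omega)]
      simp only [hget]
    rw [hcongr, ih]
    have hx : PySem.List.pyGet? (xs ++ [x]) (xs.length : Int) = some x := by
      have := PySem.List.pyGet?_append_length (pre := xs) (y := x) (ys := ([] : List Int))
      simpa using this
    simp only [List.foldl_cons, List.foldl_nil, hx]
    rw [pvCnt_append, pvCnt_append, pvCnt_append]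
    simp only [Prod.mk.injEq]
    refine ⟨?_, ?_, ?_⟩ <;> (split <;> simp_all)

-- replacing the unique item with key k (value w) by (k, w+1) adds [c k] to the weighted sum
theorem pv_sum_map_replace (l : List ((Int × Int) × Int)) (k : Int × Int) (w : Int)
    (c : Int × Int → Prop) [DecidablePred c] (hnd : (l.map Prod.fst).Nodup) (hmem : (k, w) ∈ l) :
    ((l.map (fun p => if p.1 == k then (k, w + 1) else p)).map
        (fun it => if c it.1 then it.2 else (0 : Int))).sum
    = (l.map (fun it => if c it.1 then it.2 else (0 : Int))).sum
        + (if c k then (1 : Int) else 0) := by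
  induction l with
  | nil => simp at hmem
  | cons p l ih =>
    simp only [List.map_cons, List.nodup_cons, List.mem_map] at hnd
    by_cases hp : p.1 = k
    · have hpk : p = (k, w) := by
        rcases List.mem_cons.mp hmem with h | h
        · exact h.symm
        · exact absurd ⟨(k, w), h, by simp [hp]⟩ hnd.1
      have htail : ∀ q ∈ l, (if q.1 == k then (k, w + 1) else q) = q := by
        intro q hq
        have hqk : q.1 ≠ k := by
          intro hqk
          exact hnd.1 ⟨q, hq, by simp [hp, hqk]⟩
        simp [hqk]
      subst hpk
      rw [List.map_cons, List.map_congr_left htail, List.map_cons, List.map_cons,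
        List.sum_cons, List.sum_cons]
      simp only [beq_self_eq_true, if_true]
      by_cases hc : c k
      · simp [hc, List.map_id']
        ring
      · simp [hc, List.map_id']
    · have hmem' : (k, w) ∈ l := by
        rcases List.mem_cons.mp hmem with h | h
        · exact absurd (by rw [← h]) hp
        · exact h
      have hhead : (if p.1 == k then (k, w + 1) else p) = p := by simp [hp]
      rw [List.map_cons, hhead, List.map_cons, List.map_cons, List.sum_cons, List.sum_cons,
        ih hnd.2 hmem']
      ring

-- inserting k ↦ getD k 0 + 1 adds [c k] to the weighted item sum
theorem pv_sum_items_insert (d : PySem.Dict (Int × Int) Int) (k : Int × Int)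
    (c : Int × Int → Prop) [DecidablePred c] (hnd : d.keys.Nodup) :
    ((d.insert k (d.getD k 0 + 1)).items.map
        (fun it => if c it.1 then it.2 else (0 : Int))).sum
    = (d.items.map (fun it => if c it.1 then it.2 else (0 : Int))).sum
        + (if c k then (1 : Int) else 0) := by
  cases hv : d.get? k with
  | some v =>
    have h : d.contains k = true := by
      rw [PySem.Dict.contains_eq_isSome_get?, hv]; rfl
    rw [PySem.Dict.items_insert_of_contains d _ h,
      PySem.Dict.getD_of_get?_eq_some d 0 hv]
    exact pv_sum_map_replace d.items k v c hnd (PySem.Dict.mem_items_of_get?_eq_some d hv)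
  | none =>
    have h : d.contains k = false := (PySem.Dict.get?_eq_none_iff_contains d k).mp hv
    rw [PySem.Dict.items_insert_of_not_contains d _ h, PySem.Dict.getD_of_not_contains d 0 h]
    simp

-- the key fact: scoring pattern p (len p ∣ 40) from the histogram counts the matches
theorem pv_histScore_eq (p : List Int) (hdvd : (p.length : Int) ∣ 40)
    (answers : List Int) :
    pvHistScore (pvHist answers) p = pvCnt p answers := by
  have hplen : 0 < p.length := by
    rcases Nat.eq_zero_or_pos p.length with h0 | h
    · rw [h0] at hdvd; norm_num at hdvd
    · exact h
  induction answers using List.reverseRecOn with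
  | nil => simp [pvHist, pvHistScore, pvCnt, PySem.Dict.empty]
  | append_singleton xs x ih =>
    have hnd : (pvHist xs).keys.Nodup := by
      have := PySem.Dict.nodup_keys_foldl_insert_key
        (PySem.List.enumerate xs 0)
        (fun iv => ((PySem.Int.mod iv.1 40, iv.2) : Int × Int))
        (fun (h : PySem.Dict (Int × Int) Int) iv =>
          h.getD (PySem.Int.mod iv.1 40, iv.2) 0 + 1)
        PySem.Dict.empty PySem.Dict.nodup_keys_empty
      simpa [pvHist] using this
    have hstep :
        pvHist (xs ++ [x])
          = (pvHist xs).insert (PySem.Int.mod (xs.length : Int) 40, x)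
              ((pvHist xs).getD (PySem.Int.mod (xs.length : Int) 40, x) 0 + 1) := by
      simp [pvHist, PySem.List.enumerate_append, PySem.List.enumerate_cons]
    have hmm : PySem.Int.mod (PySem.Int.mod (xs.length : Int) 40) (p.length : Int)
        = PySem.Int.mod (xs.length : Int) (p.length : Int) := by
      have hp : (0 : Int) < (p.length : Int) := by exact_mod_cast hplen
      rw [PySem.Int.mod_eq_emod_of_pos hp, PySem.Int.mod_eq_emod_of_pos (by norm_num : (0:Int) < 40),
        PySem.Int.mod_eq_emod_of_pos hp]
      exact Int.emod_emod_of_dvd _ hdvd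
    rw [hstep, pvCnt_append, ← ih]
    unfold pvHistScore
    rw [pv_sum_items_insert (pvHist xs) _
      (fun q => q.2 = (PySem.List.pyGet? p (PySem.Int.mod q.1 (p.length : Int))).getD 0)
      hnd]
    simp only [hmm]

-- the two selection loops differ only in the orientation of the equality test
theorem pv_sel (r : List Int) (xs : List Int) (m : Int) :
    List.foldl (fun acc i => if m = (PySem.List.pyGet? xs i).getD 0 then acc ++ [i + 1] else acc)
      ([] : List Int) r
    = List.foldl (fun acc i => if (PySem.List.pyGet? xs i).getD 0 = m then acc ++ [i + 1] else acc)
      ([] : List Int) r := by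
  apply PySem.List.foldl_congr_mem
  intro acc i _
  simp [eq_comm]

-- ===== VERDICT (by name: the statement is the Claim_ definition above) =====
theorem solution_spec : Claim_equal_solution := by
  intro answers _
  show solution answers = solution_alt answers
  simp only [solution, solution_alt, List.map]
  rw [pv_loop_eq]
  simp only [pv_histScore_eq [1,2,3,4,5] (by norm_num),
    pv_histScore_eq [2,1,2,3,2,4,2,5] (by norm_num),
    pv_histScore_eq [3,3,1,1,2,2,4,4,5,5] (by norm_num)]
  exact pv_sel _ _ _
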